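-- pv_equiv track=rewrite | github.com/chulbioinfo/CSAVanalysis | 12.HumanSAV/Analysis/SCV_SAV.py | EnrichmentTEST_CODON
-- ===== SOURCE A (Python) =====
-- CODONTABLE_dic  = {'TTT':'F','TTC':'F','TTA':'L','TTG':'L','CTT':'L','CTC':'L','CTA':'L','CTG':'L','ATT':'I','ATC':'I','ATA':'I','ATG':'M','GTT':'V','GTC':'V','GTA':'V','GTG':'V','TCT':'S','TCC':'S','TCA':'S','TCG':'S','CCT':'P','CCC':'P','CCA':'P','CCG':'P','ACT':'T','ACC':'T','ACA':'T','ACG':'T','GCT':'A','GCC':'A','GCA':'A','GCG':'A','TAT':'Y','TAC':'Y','TAA':'Z','TAG':'Z','CAT':'H','CAC':'H','CAA':'Q','CAG':'Q','AAT':'N','AAC':'N','AAA':'K','AAG':'K','GAT':'D','GAC':'D','GAA':'E','GAG':'E','TGT':'C','TGC':'C','TGA':'Z','TGG':'W','CGT':'R','CGC':'R','CGA':'R','CGG':'R','AGT':'S','AGC':'S','AGA':'R','AGG':'R','GGT':'G','GGC':'G','GGA':'G','GGG':'G',"---":"-",'CTN':'L','GTN':'V','TCN':'S','CCN':'P','ACN':'T','GCN':'A','CGN':'R','GGN':'G'}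 # Stop codon = 'Z', NNN = 'X'
--
-- def EnrichmentTEST_CODON(targetCODON_list, othersCODON_list):
--     targetCODON_set = []
--     for targetCODON in targetCODON_list:
--         if not targetCODON == "...":
--             targetCODON_set.append(targetCODON)
--     othersCODON_set = []
--     for othersCODON in othersCODON_list:
--         if not othersCODON == "...":
--             othersCODON_set.append(othersCODON)
--     targetCODON_set = list(set(targetCODON_set))
--     targetCODON_set.sort()
--     othersCODON_set = list(set(othersCODON_set))
--     othersCODON_set.sort()
--     CNT_target_targetCODON     = 0
--     CNT_target_othersCODON     = 0
--     CNT_others_targetCODON     = 0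
--     CNT_others_othersCODON     = 0
--     for nCODON in CODONTABLE_dic.keys():
--         if nCODON in targetCODON_set:
--             targetCODON = nCODON
--             CNT_target_targetCODON += targetCODON_list.count(targetCODON)
--             CNT_others_targetCODON += othersCODON_list.count(targetCODON)
--         else:
--             othersCODON = nCODON
--             CNT_target_othersCODON += targetCODON_list.count(othersCODON)
--             CNT_others_othersCODON += othersCODON_list.count(othersCODON)
--     a = CNT_target_targetCODON
--     b = CNT_target_othersCODON
--     c = CNT_others_targetCODON
--     d = CNT_others_othersCODON
--     contingency_table = [[a,b],[c,d]]
--     # Fisher Exact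
--     oddsratio, pvalue = "#N/A","#N/A" #stats.fisher_exact(contingency_table)
--     return ','.join(targetCODON_set),','.join(othersCODON_set), oddsratio, pvalue
-- ===== SOURCE B (Python) =====
-- def _ins(acc, x):
--     # insert x into the strictly sorted duplicate-free list acc
--     # (hand-written binary search for the insertion point, then list.insert)
--     lo, hi = 0, len(acc)
--     while lo < hi:
--         mid = (lo + hi) // 2
--         if acc[mid] < x:
--             lo = mid + 1
--         else:
--             hi = mid
--     if lo < len(acc) and acc[lo] == x:
--         return acc
--     acc.insert(lo, x)
--     return acc
--
-- def EnrichmentTEST_CODON(targetCODON_list, othersCODON_list):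
--     # One online pass per input list: each non-"..." codon is binary-search
--     # inserted into a strictly sorted duplicate-free list, instead of staged
--     # filter / set() / sort passes.  The contingency-table counting of the
--     # original never reaches the return value (oddsratio/pvalue are the
--     # constants "#N/A"), so it is not performed.
--     target_set = []
--     for c in targetCODON_list:
--         if c != "...":
--             target_set = _ins(target_set, c)
--     others_set = []
--     for c in othersCODON_list:
--         if c != "...":
--             others_set = _ins(others_set, c)
--     return ','.join(target_set), ','.join(others_set), "#N/A", "#N/A"
-- ===== Notes on version B (the rewrite author's own statement) =====
-- stated objective: alternative
-- what changed: B replaces A's staged filter/set()/sort passes and its 72-key contingency-count loop (whose result never reaches the return value) by a single online pass per list that binary-search-inserts each non-'...' codon into a strictly sorted duplicate-free list.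
import Mathlib
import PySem

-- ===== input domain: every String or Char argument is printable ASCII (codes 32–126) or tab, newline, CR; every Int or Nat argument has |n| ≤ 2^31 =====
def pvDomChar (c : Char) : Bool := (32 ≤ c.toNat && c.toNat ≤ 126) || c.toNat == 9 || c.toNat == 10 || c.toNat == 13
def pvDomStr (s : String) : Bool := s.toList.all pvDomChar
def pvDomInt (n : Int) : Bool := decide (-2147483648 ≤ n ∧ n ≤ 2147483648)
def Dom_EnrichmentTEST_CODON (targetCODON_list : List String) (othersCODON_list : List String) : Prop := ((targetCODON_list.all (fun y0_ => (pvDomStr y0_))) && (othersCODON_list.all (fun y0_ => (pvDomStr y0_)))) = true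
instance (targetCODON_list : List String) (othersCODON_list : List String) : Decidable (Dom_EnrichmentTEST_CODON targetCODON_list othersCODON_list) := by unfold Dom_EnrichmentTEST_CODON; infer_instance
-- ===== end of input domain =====

-- B builds each sorted duplicate-free codon list by online binary-search insertion in one pass
-- (and skips A's contingency counting, whose result never reaches the return value); objective: alternative.

-- ===== PORT A =====
-- keys of CODONTABLE_dic, in dict insertion order
def pvCODONTABLE_keys : List String := ["TTT", "TTC", "TTA", "TTG", "CTT", "CTC", "CTA", "CTG", "ATT", "ATC", "ATA", "ATG", "GTT", "GTC", "GTA", "GTG", "TCT", "TCC", "TCA", "TCG", "CCT", "CCC", "CCA", "CCG", "ACT", "ACC", "ACA", "ACG", "GCT", "GCC", "GCA", "GCG", "TAT", "TAC", "TAA", "TAG", "CAT", "CAC", "CAA", "CAG", "AAT", "AAC", "AAA", "AAG", "GAT", "GAC", "GAA", "GAG", "TGT", "TGC", "TGA", "TGG", "CGT", "CGC", "CGA", "CGG", "AGT", "AGC", "AGA", "AGG", "GGT", "GGC", "GGA", "GGG", "---", "CTN", "GTN", "TCN", "CCN", "ACN", "GCN", "CGN", "GGN"]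

def EnrichmentTEST_CODON (targetCODON_list : List String) (othersCODON_list : List String) : String × String × String × String :=
  -- filtering loops: append each codon that is not "..."
  let targetCODON_set0 : List String :=
    targetCODON_list.foldl (fun acc c => if c != "..." then acc ++ [c] else acc) []
  let othersCODON_set0 : List String :=
    othersCODON_list.foldl (fun acc c => if c != "..." then acc ++ [c] else acc) []
  -- targetCODON_set = list(set(...)); targetCODON_set.sort()  (likewise others)
  let targetCODON_set := PySem.List.sorted (PySem.Set.ofList targetCODON_set0) (fun x => x) false
  let othersCODON_set := PySem.List.sorted (PySem.Set.ofList othersCODON_set0) (fun x => x) false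
  -- counting loop over CODONTABLE_dic.keys(); state = (CNT_target_target, CNT_target_others, CNT_others_target, CNT_others_others)
  let counts : Int × Int × Int × Int :=
    pvCODONTABLE_keys.foldl (fun st nCODON =>
      if targetCODON_set.contains nCODON then
        (st.1 + PySem.List.count targetCODON_list nCODON, st.2.1,
         st.2.2.1 + PySem.List.count othersCODON_list nCODON, st.2.2.2)
      else
        (st.1, st.2.1 + PySem.List.count targetCODON_list nCODON,
         st.2.2.1, st.2.2.2 + PySem.List.count othersCODON_list nCODON)) (0, 0, 0, 0)
  -- contingency_table = [[a,b],[c,d]] is built but never returned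
  let _contingency_table := [[counts.1, counts.2.1], [counts.2.2.1, counts.2.2.2]]
  let oddsratio := "#N/A"
  let pvalue := "#N/A"
  (PySem.Str.join "," targetCODON_set, PySem.Str.join "," othersCODON_set, oddsratio, pvalue)

-- ===== PORT B =====
-- the 'while lo < hi' binary-search loop of _ins; acc[mid] is always in range when lo < hi ≤ len(acc),
-- ported with getD (default never read); Python's (lo+hi)//2 on the Nat loop indices is Nat division
def pvBisect (acc : List String) (x : String) (lo hi : Nat) : Nat :=
  if lo < hi then
    let mid := (lo + hi) / 2
    if acc.getD mid "" < x then pvBisect acc x (mid + 1) hi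
    else pvBisect acc x lo mid
  else lo
termination_by hi - lo
decreasing_by
  · omega
  · omega

-- _ins: binary-search insertion of x into the strictly sorted duplicate-free acc
-- (Source B mutates its local accumulator with acc.insert(lo, x) and returns it; value-equal to this)
def pvIns (x : String) (acc : List String) : List String :=
  -- lo = pvBisect acc x 0 acc.length (written out; Source B computes it once into a variable)
  if pvBisect acc x 0 acc.length < acc.length && acc.getD (pvBisect acc x 0 acc.length) "" == x then acc
  else PySem.List.insert acc ((pvBisect acc x 0 acc.length : Nat) : Int) x

def EnrichmentTEST_CODON_alt (targetCODON_list : List String) (othersCODON_list : List String) : String × String × String × String :=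
  let target_set : List String :=
    targetCODON_list.foldl (fun acc c => if c != "..." then pvIns c acc else acc) []
  let others_set : List String :=
    othersCODON_list.foldl (fun acc c => if c != "..." then pvIns c acc else acc) []
  (PySem.Str.join "," target_set, PySem.Str.join "," others_set, "#N/A", "#N/A")

-- ===== PRECONDITION & SPEC =====
def Spec_EnrichmentTEST_CODON (targetCODON_list : List String) (othersCODON_list : List String) (out : String × String × String × String) : Prop := out = EnrichmentTEST_CODON_alt targetCODON_list othersCODON_list
instance (targetCODON_list : List String) (othersCODON_list : List String) (out : String × String × String × String) : Decidable (Spec_EnrichmentTEST_CODON targetCODON_list othersCODON_list out) := by unfold Spec_EnrichmentTEST_CODON; infer_instance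

-- ===== CLAIM (what is proved, stated in full; the proofs are below) =====
def Claim_equal_EnrichmentTEST_CODON : Prop := ∀ (targetCODON_list : List String) (othersCODON_list : List String), Dom_EnrichmentTEST_CODON targetCODON_list othersCODON_list → Spec_EnrichmentTEST_CODON targetCODON_list othersCODON_list (EnrichmentTEST_CODON targetCODON_list othersCODON_list)

-- ===== LEMMAS AND PROOFS =====
theorem pv_filter_loop (l : List String) :
    l.foldl (fun acc c => if c != "..." then acc ++ [c] else acc) [] = l.filter (fun c => c != "...") := by
  simpa using PySem.List.foldl_append_if_eq_filter (l := l) (p := fun c => c != "...") (acc := [])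

-- a strictly sorted list read through getD is monotone
theorem pv_getD_mono (acc : List String) (hs : acc.Pairwise (· < ·))
    {i j : Nat} (hij : i ≤ j) (hj : j < acc.length) :
    acc.getD i "" ≤ acc.getD j "" := by
  rcases Nat.lt_or_ge i j with h | h
  · rw [List.getD_eq_getElem acc "" (by omega), List.getD_eq_getElem acc "" hj]
    exact le_of_lt (List.pairwise_iff_getElem.mp hs i j (by omega) hj h)
  · have : i = j := by omega
    subst this; rfl

-- invariant of the binary-search loop: the returned index separates '< x' from '≥ x'
theorem pv_bisect_spec (acc : List String) (x : String) (hs : acc.Pairwise (· < ·))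
    (lo hi : Nat) :
    lo ≤ hi → hi ≤ acc.length →
    (∀ j, j < lo → acc.getD j "" < x) →
    (∀ j, hi ≤ j → j < acc.length → x ≤ acc.getD j "") →
    (pvBisect acc x lo hi ≤ acc.length ∧
      (∀ j, j < pvBisect acc x lo hi → acc.getD j "" < x) ∧
      (∀ j, pvBisect acc x lo hi ≤ j → j < acc.length → x ≤ acc.getD j "")) := by
  fun_induction pvBisect acc x lo hi with
  | case1 lo hi hlt mid hmid ih =>
    intro hlohi hhi hlo hhi2
    refine ih (by omega) hhi ?_ hhi2
    intro j hj
    rcases Nat.lt_or_ge j mid with h | h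
    · exact lt_of_le_of_lt (pv_getD_mono acc hs (le_of_lt h) (by omega)) hmid
    · have : j = mid := by omega
      subst this; exact hmid
  | case2 lo hi hlt mid hmid ih =>
    intro hlohi hhi hlo hhi2
    refine ih (by omega) (by omega) hlo ?_
    intro j hj hjl
    have hx : x ≤ acc.getD mid "" := not_lt.mp hmid
    exact le_trans hx (pv_getD_mono acc hs hj hjl)
  | case3 lo hi hlt =>
    intro hlohi hhi hlo hhi2
    exact ⟨by omega, hlo, fun j hj hjl => hhi2 j (by omega) hjl⟩

-- Python's acc.insert(lo, x) at a position lo ≤ len(acc)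
theorem pv_insert_eq (acc : List String) (n : Nat) (x : String) (h : n ≤ acc.length) :
    PySem.List.insert acc (n : Int) x = acc.take n ++ x :: acc.drop n := by
  simp [PySem.List.insert, PySem.List.sliceIndices]
  split_ifs with h1
  · omega
  · have hm : (min (n : Int) (acc.length : Int)).toNat = n := by omega
    rw [hm]

theorem pv_mem_ins (x z : String) (acc : List String) (hs : acc.Pairwise (· < ·)) :
    z ∈ pvIns x acc ↔ z = x ∨ z ∈ acc := by
  unfold pvIns
  split_ifs with h
  · -- x already present: acc[lo] = x
    rw [Bool.and_eq_true, decide_eq_true_eq, beq_iff_eq] at h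
    obtain ⟨hlt, heq⟩ := h
    have hx : x ∈ acc := by
      rw [← heq, List.getD_eq_getElem acc "" hlt]
      exact List.getElem_mem hlt
    constructor
    · exact Or.inr
    · rintro (rfl | hz)
      · exact hx
      · exact hz
  · have hle : pvBisect acc x 0 acc.length ≤ acc.length :=
      (pv_bisect_spec acc x hs 0 acc.length (by omega) le_rfl (by omega) (fun j hj hjl => by omega)).1
    rw [pv_insert_eq acc _ x hle]
    simp only [List.mem_append, List.mem_cons]
    constructor
    · rintro (h1 | rfl | h2)
      · exact Or.inr (List.mem_of_mem_take h1)
      · exact Or.inl rfl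
      · exact Or.inr (List.mem_of_mem_drop h2)
    · rintro (rfl | hz)
      · exact Or.inr (Or.inl rfl)
      · rcases List.mem_append.mp ((List.take_append_drop (pvBisect acc x 0 acc.length) acc) ▸ hz) with h1 | h2
        · exact Or.inl h1
        · exact Or.inr (Or.inr h2)

theorem pv_ins_pairwise (x : String) (acc : List String)
    (hs : acc.Pairwise (· < ·)) : (pvIns x acc).Pairwise (· < ·) := by
  unfold pvIns
  split_ifs with h
  · exact hs
  · obtain ⟨hle, hlt, hge⟩ :=
      pv_bisect_spec acc x hs 0 acc.length (by omega) le_rfl (by omega) (fun j hj hjl => by omega)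
    set lo := pvBisect acc x 0 acc.length with hlo
    rw [Bool.and_eq_true, decide_eq_true_eq, beq_iff_eq, not_and_or] at h
    -- x is strictly greater than everything before lo and strictly less than everything from lo on
    have hgt : ∀ j, lo ≤ j → j < acc.length → x < acc.getD j "" := by
      intro j hj hjl
      have h1 : x ≤ acc.getD lo "" := hge lo le_rfl (by omega)
      have h2 : x ≠ acc.getD lo "" := by
        rcases h with h | h
        · omega
        · exact fun he => h he.symm
      exact lt_of_lt_of_le (lt_of_le_of_ne h1 h2) (pv_getD_mono acc hs hj hjl)
    rw [pv_insert_eq acc lo x hle, List.pairwise_append]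
    refine ⟨hs.sublist (List.take_sublist lo acc), ?_, ?_⟩
    · rw [List.pairwise_cons]
      refine ⟨?_, hs.sublist (List.drop_sublist lo acc)⟩
      intro b hb
      rw [List.mem_iff_getElem] at hb
      obtain ⟨i, hi, he⟩ := hb
      rw [List.length_drop] at hi
      have : acc.getD (lo + i) "" = b := by
        rw [List.getD_eq_getElem acc "" (by omega), ← he, List.getElem_drop]
      exact this ▸ hgt (lo + i) (by omega) (by omega)
    · intro a ha b hb
      rw [List.mem_iff_getElem] at ha
      obtain ⟨i, hi, he⟩ := ha
      rw [List.length_take] at hi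
      have ha' : acc.getD i "" = a := by
        rw [List.getD_eq_getElem acc "" (by omega), ← he, List.getElem_take]
      have hax : a < x := ha' ▸ hlt i (by omega)
      rcases List.mem_cons.mp hb with rfl | hb
      · exact hax
      · rw [List.mem_iff_getElem] at hb
        obtain ⟨j, hj, he2⟩ := hb
        rw [List.length_drop] at hj
        have hb' : acc.getD (lo + j) "" = b := by
          rw [List.getD_eq_getElem acc "" (by omega), ← he2, List.getElem_drop]
        exact lt_trans hax (hb' ▸ hgt (lo + j) (by omega) (by omega))

theorem pv_fold_pairwise (l : List String) (acc : List String)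
    (h : acc.Pairwise (· < ·)) :
    (l.foldl (fun acc c => if c != "..." then pvIns c acc else acc) acc).Pairwise (· < ·) := by
  induction l generalizing acc with
  | nil => simp only [List.foldl_nil]; exact h
  | cons c cs ih =>
    simp only [List.foldl_cons]
    split_ifs with hc
    · exact ih _ (pv_ins_pairwise c acc h)
    · exact ih _ h

theorem pv_fold_mem (l : List String) (acc : List String) (h : acc.Pairwise (· < ·)) (z : String) :
    z ∈ l.foldl (fun acc c => if c != "..." then pvIns c acc else acc) acc ↔
      z ∈ acc ∨ (z ∈ l ∧ z ≠ "...") := by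
  induction l generalizing acc with
  | nil => simp
  | cons c cs ih =>
    simp only [List.foldl_cons]
    by_cases hc : c = "..."
    · subst hc
      rw [if_neg (by simp)]
      rw [ih acc h]
      simp only [List.mem_cons]
      tauto
    · rw [if_pos (by simpa using hc)]
      rw [ih _ (pv_ins_pairwise c acc h)]
      rw [pv_mem_ins c z acc h]
      simp only [List.mem_cons]
      constructor
      · rintro ((rfl | h1) | h1)
        · exact Or.inr ⟨Or.inl rfl, hc⟩
        · exact Or.inl h1
        · exact Or.inr ⟨Or.inr h1.1, h1.2⟩
      · rintro (h1 | ⟨rfl | h1, hne⟩)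
        · exact Or.inl (Or.inr h1)
        · exact Or.inl (Or.inl rfl)
        · exact Or.inr ⟨h1, hne⟩

-- A's sorted(set(filter xs)) equals B's one-pass binary-search-insertion result
theorem pv_sorted_eq_fold (l : List String) :
    PySem.List.sorted (PySem.Set.ofList (l.filter (fun c => c != "..."))) (fun x => x) false =
      l.foldl (fun acc c => if c != "..." then pvIns c acc else acc) [] := by
  set B := l.foldl (fun acc c => if c != "..." then pvIns c acc else acc) [] with hB
  have hpw : B.Pairwise (· < ·) := pv_fold_pairwise l [] (by simp)
  have hnodupB : B.Nodup := hpw.imp (fun h => ne_of_lt h)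
  have hmem : ∀ z, z ∈ B ↔ z ∈ PySem.Set.ofList (l.filter (fun c => c != "...")) := by
    intro z
    rw [PySem.Set.mem_ofList, hB, pv_fold_mem l [] (by simp)]
    simp [List.mem_filter]
  have hperm : B.Perm (PySem.Set.ofList (l.filter (fun c => c != "..."))) :=
    (List.perm_ext_iff_of_nodup hnodupB (PySem.Set.nodup_ofList _)).mpr hmem
  exact PySem.List.sorted_eq_of_perm_of_pairwise_lt _ _ (fun x => x) hperm hpw

-- ===== VERDICT (by name: the statement is the Claim_ definition above) =====
theorem EnrichmentTEST_CODON_spec : Claim_equal_EnrichmentTEST_CODON := by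
  intro t o _
  unfold Spec_EnrichmentTEST_CODON EnrichmentTEST_CODON EnrichmentTEST_CODON_alt
  simp only [pv_filter_loop, pv_sorted_eq_fold]
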